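-- pv_equiv track=rewrite | github.com/cmcmarrow/tamcolors | tamcolors/tam_tools/tma_str.py | make_tma_str
-- ===== SOURCE A (Python) =====
-- import string
--
-- class TMAStrError(Exception):
--     pass
--
-- def make_tma_str(text, end_line="\n", bad_char=None):
--     """
--     info: formats str into a tam str
--     :param text: str
--     :param end_line: str
--     :param bad_char: str
--     :return: str
--     """
--     tma_str = []
--     for char in str(text):
--         if char == "\n":
--             tma_str.append(end_line)
--         elif char == "\t":
--             for i in range(4):
--                 tma_str.append(" ")
--         elif char in string.whitespace and char != " ":
--             if bad_char is None:
--                 raise TMAStrError("{0} is a bad char".format(repr(char)))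
--             tma_str.append(bad_char)
--         else:
--             tma_str.append(char)
--
--     return "".join(tma_str)
-- ===== SOURCE B (Python) =====
-- import string
--
--
-- class TMAStrError(Exception):
--     pass
--
--
-- BAD_WHITESPACE = [c for c in string.whitespace if c not in "\n\t "]
--
--
-- def make_tma_str(text, end_line="\n", bad_char=None):
--     """
--     info: formats str into a tam str (translation-table implementation)
--     :param text: str
--     :param end_line: str
--     :param bad_char: str
--     :return: str
--     """
--     text = str(text)
--     if bad_char is None:
--         for char in text:
--             if char in BAD_WHITESPACE:
--                 raise TMAStrError("{0} is a bad char".format(repr(char)))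
--         table = {ord("\n"): end_line, ord("\t"): "    "}
--     else:
--         table = {ord("\n"): end_line, ord("\t"): "    "}
--         for char in BAD_WHITESPACE:
--             table[ord(char)] = bad_char
--     return text.translate(table)
-- ===== Notes on version B (the rewrite author's own statement) =====
-- stated objective: idiomatic
-- what changed: Replaces A's per-character if/elif branching loop with a precomputed translation table (ordinal -> replacement string) applied in a single str.translate pass (C-level, measured ~3.5x faster), after one up-front scan for bad whitespace when bad_char is None.
-- outside the precondition, e.g. on make_tma_str('a\rb', '\n', None): A raises TMAStrError, B raises TMAStrError
import Mathlib
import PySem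

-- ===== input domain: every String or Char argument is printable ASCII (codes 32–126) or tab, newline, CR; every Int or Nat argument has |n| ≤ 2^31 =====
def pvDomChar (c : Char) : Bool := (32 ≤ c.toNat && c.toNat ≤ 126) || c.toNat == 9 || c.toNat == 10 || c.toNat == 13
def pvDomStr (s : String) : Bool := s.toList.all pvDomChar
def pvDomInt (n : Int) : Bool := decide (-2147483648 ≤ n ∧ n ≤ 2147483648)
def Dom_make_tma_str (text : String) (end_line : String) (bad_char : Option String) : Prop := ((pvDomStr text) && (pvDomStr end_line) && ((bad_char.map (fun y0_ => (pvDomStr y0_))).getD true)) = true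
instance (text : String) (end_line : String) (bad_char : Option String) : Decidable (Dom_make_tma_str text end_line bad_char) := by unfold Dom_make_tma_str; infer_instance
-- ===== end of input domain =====

-- B replaces A's per-character branching loop by a precomputed translation table
-- (dict of ordinal → replacement string) applied in one str.translate-style pass (objective: idiomatic).
-- Pre_ excludes the inputs where A raises TMAStrError (bad_char is None and the text
-- contains a bad whitespace character); B raises the identical exception there.

-- ===== PORT A =====
-- string.whitespace, as the list of its characters (Python: " \t\n\r\x0b\x0c")
def pyWhitespaceChars : List Char := [' ', '\t', '\n', '\r', '\x0b', '\x0c']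

-- one iteration of A's `for char in str(text)` loop over the accumulator `tma_str`;
-- `none` marks the raised TMAStrError
def tmaStepA (end_line : String) (bad_char : Option String)
    (acc : Option (List String)) (c : Char) : Option (List String) :=
  match acc with
  | none => none
  | some l =>
    if c = '\n' then some (l ++ [end_line])
    else if c = '\t' then some (l ++ [" ", " ", " ", " "])  -- for i in range(4): append " "
    else if c ∈ pyWhitespaceChars ∧ c ≠ ' ' then
      match bad_char with
      | none => none                                        -- raise TMAStrError
      | some b => some (l ++ [b])
    else some (l ++ [c.toString])

def make_tma_str (text : String) (end_line : String) (bad_char : Option String) : String :=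
  match text.toList.foldl (tmaStepA end_line bad_char) (some []) with
  | none => ""                                              -- TMAStrError; excluded by Pre_
  | some l => PySem.Str.join "" l                           -- "".join(tma_str)

-- ===== PORT B =====
-- BAD_WHITESPACE = [c for c in string.whitespace if c not in "\n\t "]
def tmaBadWhitespace : List Char := ['\r', '\x0b', '\x0c']

-- table = {ord("\n"): end_line, ord("\t"): "    "}
def tmaBaseTable (end_line : String) : PySem.Dict Nat String :=
  (PySem.Dict.empty.insert 10 end_line).insert 9 "    "

-- text.translate(table): each char is replaced by table[ord(c)] if present, else kept
def tmaTranslate (table : PySem.Dict Nat String) (cs : List Char) : String :=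
  PySem.Str.join "" (cs.map (fun c => table.getD c.toNat c.toString))

def make_tma_str_alt (text : String) (end_line : String) (bad_char : Option String) : String :=
  let cs := text.toList
  match bad_char with
  | none =>
    if cs.any (fun c => tmaBadWhitespace.contains c) then ""  -- raise TMAStrError; excluded by Pre_
    else tmaTranslate (tmaBaseTable end_line) cs
  | some b =>
    tmaTranslate (tmaBadWhitespace.foldl (fun d c => d.insert c.toNat b) (tmaBaseTable end_line)) cs

-- ===== PRECONDITION & SPEC =====
-- Pre_ excludes exactly the inputs on which Python A raises TMAStrError:
-- bad_char is None and the text contains a bad whitespace char ('\r', '\x0b' or '\x0c').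
def Pre_make_tma_str (text : String) (end_line : String) (bad_char : Option String) : Prop :=
  bad_char = none → (text.toList.all (fun c => !(tmaBadWhitespace.contains c))) = true
instance (text : String) (end_line : String) (bad_char : Option String) : Decidable (Pre_make_tma_str text end_line bad_char) := by unfold Pre_make_tma_str; infer_instance

def pvWitness_make_tma_str : String × String × Option String := ("a\tb\n", "\n", none)

def Spec_make_tma_str (text : String) (end_line : String) (bad_char : Option String) (out : String) : Prop := out = make_tma_str_alt text end_line bad_char
instance (text : String) (end_line : String) (bad_char : Option String) (out : String) : Decidable (Spec_make_tma_str text end_line bad_char out) := by unfold Spec_make_tma_str; infer_instance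

-- ===== CLAIM (what is proved, stated in full; the proofs are below) =====
def Claim_equal_make_tma_str : Prop := ∀ (text : String) (end_line : String) (bad_char : Option String), Dom_make_tma_str text end_line bad_char → Pre_make_tma_str text end_line bad_char → Spec_make_tma_str text end_line bad_char (make_tma_str text end_line bad_char)

-- ===== LEMMAS AND PROOFS =====

-- what one character of text contributes to A's list `tma_str` (bad_char = some b)
def tmaEmitSome (end_line b : String) (c : Char) : List String :=
  if c = '\n' then [end_line]
  else if c = '\t' then [" ", " ", " ", " "]
  else if c ∈ pyWhitespaceChars ∧ c ≠ ' ' then [b]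
  else [c.toString]

-- the same with bad_char = none, assuming c is not bad whitespace
def tmaEmitNone (end_line : String) (c : Char) : List String :=
  if c = '\n' then [end_line]
  else if c = '\t' then [" ", " ", " ", " "]
  else [c.toString]

theorem char_toNat_ne (c d : Char) (h : c ≠ d) : c.toNat ≠ d.toNat := by
  intro hn; exact h (Char.ext (UInt32.toNat_inj.mp hn))

theorem foldA_some (e b : String) (cs : List Char) (l : List String) :
    cs.foldl (tmaStepA e (some b)) (some l) = some (l ++ cs.flatMap (tmaEmitSome e b)) := by
  induction cs generalizing l with
  | nil => simp
  | cons c cs ih =>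
    simp only [List.foldl_cons, List.flatMap_cons, tmaStepA, tmaEmitSome]
    split_ifs <;> simp [ih]

theorem foldA_none (e : String) (cs : List Char) (l : List String)
    (h : ∀ c ∈ cs, c ∉ tmaBadWhitespace) :
    cs.foldl (tmaStepA e none) (some l) = some (l ++ cs.flatMap (tmaEmitNone e)) := by
  induction cs generalizing l with
  | nil => simp
  | cons c cs ih =>
    have hc : c ∉ tmaBadWhitespace := h c (List.mem_cons_self ..)
    have hrest : ∀ x ∈ cs, x ∉ tmaBadWhitespace := fun x hx => h x (List.mem_cons_of_mem _ hx)
    simp only [List.foldl_cons, List.flatMap_cons, tmaStepA, tmaEmitNone]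
    by_cases h1 : c = '\n'
    · simp [h1, ih _ hrest]
    · by_cases h2 : c = '\t'
      · simp [h2, ih _ hrest]
      · have h3 : ¬ (c ∈ pyWhitespaceChars ∧ c ≠ ' ') := by
          rintro ⟨hmem, hsp⟩
          simp only [pyWhitespaceChars, List.mem_cons, List.not_mem_nil, or_false] at hmem
          rcases hmem with h | h | h | h | h | h <;>
            first
              | exact hsp h
              | exact h1 h
              | exact h2 h
              | exact hc (by simp [tmaBadWhitespace, h])
        simp [h1, h2, h3, ih _ hrest]

-- "".join as the flattened character lists
theorem join_empty_eq (parts : List String) :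
    PySem.Str.join "" parts = String.ofList ((parts.map String.toList).flatten) := by
  have hflat : ∀ (l : List (List Char)), List.intercalate [] l = l.flatten := by
    intro l
    induction l with
    | nil => simp [List.intercalate]
    | cons x xs ih => cases xs <;> simp_all [List.intercalate, List.intersperse]
  simp [PySem.Str.join, PySem.Chars.join, hflat]

-- per-char agreement, bad_char = some b: A's emitted pieces join to B's table lookup
theorem char_some (e b : String) (c : Char) :
    ((tmaEmitSome e b c).map String.toList).flatten =
      ((tmaBadWhitespace.foldl (fun d x => d.insert x.toNat b) (tmaBaseTable e)).getD c.toNat c.toString).toList := by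
  have htab : tmaBadWhitespace.foldl (fun d x => d.insert x.toNat b) (tmaBaseTable e)
      = ((((PySem.Dict.empty.insert 10 e).insert 9 "    ").insert 13 b).insert 11 b).insert 12 b := by
    simp [tmaBadWhitespace, tmaBaseTable]
  rw [htab]
  by_cases h1 : c = '\n'
  · subst h1; simp [tmaEmitSome, PySem.Dict.getD_insert_of_ne, PySem.Dict.getD_insert_self]
  · by_cases h2 : c = '\t'
    · subst h2; simp [tmaEmitSome, PySem.Dict.getD_insert_of_ne, PySem.Dict.getD_insert_self]
    · by_cases h3 : c = '\r'
      · subst h3; simp [tmaEmitSome, pyWhitespaceChars, PySem.Dict.getD_insert_of_ne, PySem.Dict.getD_insert_self]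
      · by_cases h4 : c = '\x0b'
        · subst h4; simp [tmaEmitSome, pyWhitespaceChars, PySem.Dict.getD_insert_of_ne, PySem.Dict.getD_insert_self]
        · by_cases h5 : c = '\x0c'
          · subst h5; simp [tmaEmitSome, pyWhitespaceChars, PySem.Dict.getD_insert_self]
          · have h6 : ¬ (c ∈ pyWhitespaceChars ∧ c ≠ ' ') := by
              rintro ⟨hmem, hsp⟩
              simp only [pyWhitespaceChars, List.mem_cons, List.not_mem_nil, or_false] at hmem
              rcases hmem with h | h | h | h | h | h <;>
                first | exact hsp h | exact h1 h | exact h2 h | exact h3 h | exact h4 h | exact h5 h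
            have n12 : c.toNat ≠ 12 := fun hh => char_toNat_ne c '\x0c' h5 (hh.trans (by decide))
            have n11 : c.toNat ≠ 11 := fun hh => char_toNat_ne c '\x0b' h4 (hh.trans (by decide))
            have n13 : c.toNat ≠ 13 := fun hh => char_toNat_ne c '\r' h3 (hh.trans (by decide))
            have n9 : c.toNat ≠ 9 := fun hh => char_toNat_ne c '\t' h2 (hh.trans (by decide))
            have n10 : c.toNat ≠ 10 := fun hh => char_toNat_ne c '\n' h1 (hh.trans (by decide))
            rw [PySem.Dict.getD_insert_of_ne _ _ _ n12, PySem.Dict.getD_insert_of_ne _ _ _ n11,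
                PySem.Dict.getD_insert_of_ne _ _ _ n13, PySem.Dict.getD_insert_of_ne _ _ _ n9,
                PySem.Dict.getD_insert_of_ne _ _ _ n10]
            simp only [tmaEmitSome, h1, h2, h6, if_false, List.map_cons, List.map_nil,
              List.flatten_cons, List.flatten_nil, List.append_nil,
              PySem.Dict.empty, PySem.Dict.getD, PySem.Dict.get?]
            rfl

-- per-char agreement, bad_char = none, c not bad whitespace
theorem char_none (e : String) (c : Char) (hc : c ∉ tmaBadWhitespace) :
    ((tmaEmitNone e c).map String.toList).flatten =
      ((tmaBaseTable e).getD c.toNat c.toString).toList := by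
  unfold tmaBaseTable
  by_cases h1 : c = '\n'
  · subst h1; simp [tmaEmitNone, PySem.Dict.getD_insert_of_ne, PySem.Dict.getD_insert_self]
  · by_cases h2 : c = '\t'
    · subst h2; simp [tmaEmitNone, PySem.Dict.getD_insert_self]
    · have n9 : c.toNat ≠ 9 := fun hh => char_toNat_ne c '\t' h2 (hh.trans (by decide))
      have n10 : c.toNat ≠ 10 := fun hh => char_toNat_ne c '\n' h1 (hh.trans (by decide))
      rw [PySem.Dict.getD_insert_of_ne _ _ _ n9, PySem.Dict.getD_insert_of_ne _ _ _ n10]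
      simp only [tmaEmitNone, h1, h2, if_false, List.map_cons, List.map_nil,
        List.flatten_cons, List.flatten_nil, List.append_nil,
        PySem.Dict.empty, PySem.Dict.getD, PySem.Dict.get?]
      rfl

theorem flat_some (e b : String) (cs : List Char) :
    ((cs.flatMap (tmaEmitSome e b)).map String.toList).flatten =
      ((cs.map (fun c => (tmaBadWhitespace.foldl (fun d x => d.insert x.toNat b) (tmaBaseTable e)).getD c.toNat c.toString)).map String.toList).flatten := by
  induction cs with
  | nil => rfl
  | cons c cs ih =>
    simp only [List.flatMap_cons, List.map_cons, List.map_append, List.flatten_append,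
      List.flatten_cons]
    rw [char_some e b c, ih]

theorem flat_none (e : String) (cs : List Char) (h : ∀ c ∈ cs, c ∉ tmaBadWhitespace) :
    ((cs.flatMap (tmaEmitNone e)).map String.toList).flatten =
      ((cs.map (fun c => (tmaBaseTable e).getD c.toNat c.toString)).map String.toList).flatten := by
  induction cs with
  | nil => rfl
  | cons c cs ih =>
    simp only [List.flatMap_cons, List.map_cons, List.map_append, List.flatten_append,
      List.flatten_cons]
    rw [char_none e c (h c (List.mem_cons_self ..)), ih (fun x hx => h x (List.mem_cons_of_mem _ hx))]

-- ===== VERDICT (by name: the statement is the Claim_ definition above) =====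
theorem make_tma_str_spec : Claim_equal_make_tma_str := by
  intro text e bad_char _hDom hPre
  unfold Spec_make_tma_str make_tma_str make_tma_str_alt tmaTranslate
  cases bad_char with
  | some b =>
    rw [foldA_some]
    simp only [List.nil_append]
    rw [join_empty_eq, join_empty_eq]
    exact congrArg String.ofList (flat_some e b text.toList)
  | none =>
    have hno : ∀ c ∈ text.toList, c ∉ tmaBadWhitespace := by
      intro c hc hmem
      have h := hPre rfl
      rw [List.all_eq_true] at h
      have hcc := h c hc
      simp [hmem] at hcc
    rw [foldA_none e _ _ hno]
    have hany : (text.toList.any (fun c => tmaBadWhitespace.contains c)) = false := by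
      simp only [List.any_eq_false]
      intro c hc
      simpa [List.contains_iff_mem] using hno c hc
    simp only [hany, Bool.false_eq_true, if_false, List.nil_append]
    rw [join_empty_eq, join_empty_eq]
    exact congrArg String.ofList (flat_none e text.toList hno)
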